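-- pv_equiv track=rewrite | github.com/verithm/yai-alfworld | scripts/agents/base_agent.py | match_command
-- ===== SOURCE A (Python) =====
-- from typing import List, Tuple
--
-- def match_command(response: str, admissible_commands: List[str]) -> str:
--     """Fuzzy-match model output to the closest admissible command."""
--     response_lower = response.lower().strip()
--
--     # 1. Exact match
--     for cmd in admissible_commands:
--         if response_lower == cmd.lower():
--             return cmd
--
--     # 2. Response contains the command
--     for cmd in admissible_commands:
--         if cmd.lower() in response_lower:
--             return cmd
--
--     # 3. Command contains the response
--     for cmd in admissible_commands:
--         if response_lower in cmd.lower():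
--             return cmd
--
--     # 4. Fallback: first admissible command (avoids invalid actions)
--     return admissible_commands[0] if admissible_commands else "look"
-- ===== SOURCE B (Python) =====
-- def match_command(response, admissible_commands):
--     """Fuzzy-match model output to the closest admissible command (single pass)."""
--     response_lower = response.lower().strip()
--     best = None  # (priority, cmd); update only on strictly smaller priority
--     for cmd in admissible_commands:
--         c = cmd.lower()
--         if response_lower == c:
--             p = 0
--         elif c in response_lower:
--             p = 1
--         elif response_lower in c:
--             p = 2
--         else:
--             continue
--         if best is None or p < best[0]:
--             best = (p, cmd)
--     if best is not None:
--         return best[1]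
--     return admissible_commands[0] if admissible_commands else "look"
-- ===== Notes on version B (the rewrite author's own statement) =====
-- stated objective: alternative
-- what changed: B replaces A's three sequential scans (exact, command-in-response, response-in-command) with a single pass that assigns each command a priority 0/1/2 and keeps the first command of strictly minimal priority.
import Mathlib
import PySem

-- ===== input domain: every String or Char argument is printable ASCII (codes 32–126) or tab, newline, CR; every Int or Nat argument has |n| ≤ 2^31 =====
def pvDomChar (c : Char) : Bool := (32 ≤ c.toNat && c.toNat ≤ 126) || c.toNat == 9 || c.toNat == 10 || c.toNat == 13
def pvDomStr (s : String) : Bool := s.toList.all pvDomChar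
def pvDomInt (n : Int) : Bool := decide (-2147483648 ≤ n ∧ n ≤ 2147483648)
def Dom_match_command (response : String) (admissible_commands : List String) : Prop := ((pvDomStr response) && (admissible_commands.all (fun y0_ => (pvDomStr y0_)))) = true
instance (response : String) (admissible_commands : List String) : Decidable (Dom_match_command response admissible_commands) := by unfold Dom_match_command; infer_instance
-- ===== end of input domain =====

-- B makes one pass with a 0/1/2 priority per command instead of A's three scans; same matching rules, same tie-breaking.

-- ===== PORT A =====
def match_command (response : String) (admissible_commands : List String) : String :=
  let response_lower := PySem.Str.strip (PySem.Str.lower response)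
  match admissible_commands.find? (fun cmd => response_lower == PySem.Str.lower cmd) with
  | some cmd => cmd
  | none =>
    match admissible_commands.find? (fun cmd => PySem.Str.isIn (PySem.Str.lower cmd) response_lower) with
    | some cmd => cmd
    | none =>
      match admissible_commands.find? (fun cmd => PySem.Str.isIn response_lower (PySem.Str.lower cmd)) with
      | some cmd => cmd
      | none =>
        match admissible_commands with
        | [] => "look"
        | cmd :: _ => cmd

-- ===== PORT B =====
-- priority of a command: 0 exact, 1 command-in-response, 2 response-in-command, none otherwise
def mcPrio (rl cmd : String) : Option Nat :=
  let c := PySem.Str.lower cmd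
  if rl == c then some 0
  else if PySem.Str.isIn c rl then some 1
  else if PySem.Str.isIn rl c then some 2
  else none

-- one step of B's single pass: keep the first command of strictly minimal priority
def mcStep (rl : String) (best : Option (Nat × String)) (cmd : String) : Option (Nat × String) :=
  match mcPrio rl cmd with
  | none => best
  | some p =>
    match best with
    | none => some (p, cmd)
    | some (bp, bc) => if p < bp then some (p, cmd) else some (bp, bc)

def match_command_alt (response : String) (admissible_commands : List String) : String :=
  let rl := PySem.Str.strip (PySem.Str.lower response)
  match admissible_commands.foldl (mcStep rl) none with
  | some (_, cmd) => cmd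
  | none =>
    match admissible_commands with
    | [] => "look"
    | cmd :: _ => cmd

-- ===== PRECONDITION & SPEC =====
def Spec_match_command (response : String) (admissible_commands : List String) (out : String) : Prop := out = match_command_alt response admissible_commands
instance (response : String) (admissible_commands : List String) (out : String) : Decidable (Spec_match_command response admissible_commands out) := by unfold Spec_match_command; infer_instance

-- ===== CLAIM (what is proved, stated in full; the proofs are below) =====
def Claim_equal_match_command : Prop := ∀ (response : String) (admissible_commands : List String), Dom_match_command response admissible_commands → Spec_match_command response admissible_commands (match_command response admissible_commands)

-- ===== LEMMAS AND PROOFS =====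

lemma mcFold0 (rl c0 : String) (cmds : List String) :
    cmds.foldl (mcStep rl) (some (0, c0)) = some (0, c0) := by
  induction cmds with
  | nil => rfl
  | cons c t ih =>
      have hstep : mcStep rl (some (0, c0)) c = some (0, c0) := by
        unfold mcStep
        cases mcPrio rl c with
        | none => rfl
        | some p => simp
      rw [List.foldl_cons, hstep, ih]

lemma mcFold1 (rl c1 : String) (cmds : List String) :
    cmds.foldl (mcStep rl) (some (1, c1)) =
      match cmds.find? (fun c => rl == PySem.Str.lower c) with
      | some c => some (0, c)
      | none => some (1, c1) := by
  induction cmds generalizing c1 with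
  | nil => rfl
  | cons c t ih =>
      by_cases h0 : rl = PySem.Str.lower c
      · simp [List.foldl_cons, mcStep, mcPrio, h0, mcFold0]
      · have hstep : mcStep rl (some (1, c1)) c = some (1, c1) := by
          by_cases h1 : PySem.Chars.isIn (PySem.Chars.lower c.toList) rl.toList = true <;>
          by_cases h2 : PySem.Chars.isIn rl.toList (PySem.Chars.lower c.toList) = true <;>
          simp [mcStep, mcPrio, h0, h1, h2]
        simp [List.foldl_cons, hstep, ih, h0]

lemma mcFold2 (rl c2 : String) (cmds : List String) :
    cmds.foldl (mcStep rl) (some (2, c2)) =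
      match cmds.find? (fun c => rl == PySem.Str.lower c) with
      | some c => some (0, c)
      | none =>
        match cmds.find? (fun c => PySem.Str.isIn (PySem.Str.lower c) rl) with
        | some c => some (1, c)
        | none => some (2, c2) := by
  induction cmds generalizing c2 with
  | nil => rfl
  | cons c t ih =>
      by_cases h0 : rl = PySem.Str.lower c
      · simp [List.foldl_cons, mcStep, mcPrio, h0, mcFold0]
      · by_cases h1 : PySem.Chars.isIn (PySem.Chars.lower c.toList) rl.toList = true
        · simp [List.foldl_cons, mcStep, mcPrio, h0, h1, mcFold1]
        · have hstep : mcStep rl (some (2, c2)) c = some (2, c2) := by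
            by_cases h2 : PySem.Chars.isIn rl.toList (PySem.Chars.lower c.toList) = true <;>
            simp [mcStep, mcPrio, h0, h1, h2]
          simp [List.foldl_cons, hstep, ih, h0, h1]

lemma mcFoldNone (rl : String) (cmds : List String) :
    cmds.foldl (mcStep rl) none =
      match cmds.find? (fun c => rl == PySem.Str.lower c) with
      | some c => some (0, c)
      | none =>
        match cmds.find? (fun c => PySem.Str.isIn (PySem.Str.lower c) rl) with
        | some c => some (1, c)
        | none =>
          match cmds.find? (fun c => PySem.Str.isIn rl (PySem.Str.lower c)) with
          | some c => some (2, c)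
          | none => none := by
  induction cmds with
  | nil => rfl
  | cons c t ih =>
      by_cases h0 : rl = PySem.Str.lower c
      · simp [List.foldl_cons, mcStep, mcPrio, h0, mcFold0]
      · by_cases h1 : PySem.Chars.isIn (PySem.Chars.lower c.toList) rl.toList = true
        · simp [List.foldl_cons, mcStep, mcPrio, h0, h1, mcFold1]
        · by_cases h2 : PySem.Chars.isIn rl.toList (PySem.Chars.lower c.toList) = true
          · simp [List.foldl_cons, mcStep, mcPrio, h0, h1, h2, mcFold2]
          · simp [List.foldl_cons, mcStep, mcPrio, h0, h1, h2, ih]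

lemma mcMain (rl : String) (cmds : List String) :
    (match cmds.find? (fun cmd => rl == PySem.Str.lower cmd) with
     | some cmd => cmd
     | none =>
       match cmds.find? (fun cmd => PySem.Str.isIn (PySem.Str.lower cmd) rl) with
       | some cmd => cmd
       | none =>
         match cmds.find? (fun cmd => PySem.Str.isIn rl (PySem.Str.lower cmd)) with
         | some cmd => cmd
         | none =>
           match cmds with
           | [] => "look"
           | cmd :: _ => cmd) =
    (match cmds.foldl (mcStep rl) none with
     | some (_, cmd) => cmd
     | none =>
       match cmds with
       | [] => "look"
       | cmd :: _ => cmd) := by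
  rw [mcFoldNone]
  rcases hf0 : cmds.find? (fun c => rl == PySem.Str.lower c) with _ | c0
  · rcases hf1 : cmds.find? (fun c => PySem.Str.isIn (PySem.Str.lower c) rl) with _ | c1
    · rcases hf2 : cmds.find? (fun c => PySem.Str.isIn rl (PySem.Str.lower c)) with _ | c2
      · rfl
      · rfl
    · rfl
  · rfl

-- ===== VERDICT (by name: the statement is the Claim_ definition above) =====
theorem match_command_spec : Claim_equal_match_command := by
  intro response cmds _
  unfold Spec_match_command
  exact mcMain (PySem.Str.strip (PySem.Str.lower response)) cmds
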